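-- pv_equiv track=rewrite | github.com/athuls99/Ciphers | Ciphers/Day 4/Myszkowski Transposition Cipher/functions.py | createFList
-- ===== SOURCE A (Python) =====
-- from collections import Counter
--
-- def createFList(text,key):
--     keycount = Counter(key)
--     keylen = len(key)
--     textlen = len(text)
--     start = 0
--     textlist = [list() for x in range(keylen)]
--     no_of_rows = int(textlen/keylen)
--     for i in sorted(set(key)):
--         if keycount[i] == 1:
--             ind = key.index(i)
--             end = start + no_of_rows
--             textlist[ind] = list(text[start:end])
--             start = end
--         else:
--             indexes = []
--             istart = 0
--             count = keycount[i]
--             for k in range(count):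
--                 ind = key.index(i,istart)
--                 istart = ind + 1
--                 indexes.append(ind)
--             end = start + (no_of_rows*count)
--             part = text[start:end]
--             s = start
--             while(s<end):
--                 for j in indexes:
--                     textlist[j].append(part[s-start])
--                     s += 1
--             start = end
--     return (textlist,no_of_rows)
-- ===== SOURCE B (Python) =====
-- def createFList(text, key):
--     keylen = len(key)
--     no_of_rows = int(len(text) / keylen)
--     cols = {}
--     for ind, ch in enumerate(key):
--         cols.setdefault(ch, []).append(ind)
--     schedule = []
--     for ch in sorted(cols):
--         schedule.extend(cols[ch] * no_of_rows)
--     textlist = [[] for _ in range(keylen)]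
--     for col, ch in zip(schedule, text):
--         textlist[col].append(ch)
--     return (textlist, no_of_rows)
-- ===== Notes on version B (the rewrite author's own statement) =====
-- stated objective: simpler
-- what changed: B replaces A's Counter + repeated str.index + slice assignment + nested round-robin while loop by a different decomposition: one enumerate pass groups column indices per key character, the sorted groups are flattened into a column schedule, and a single zip(schedule, text) sweep fills the columns (zip truncates the excess text that A's slicing drops).
import Mathlib
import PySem

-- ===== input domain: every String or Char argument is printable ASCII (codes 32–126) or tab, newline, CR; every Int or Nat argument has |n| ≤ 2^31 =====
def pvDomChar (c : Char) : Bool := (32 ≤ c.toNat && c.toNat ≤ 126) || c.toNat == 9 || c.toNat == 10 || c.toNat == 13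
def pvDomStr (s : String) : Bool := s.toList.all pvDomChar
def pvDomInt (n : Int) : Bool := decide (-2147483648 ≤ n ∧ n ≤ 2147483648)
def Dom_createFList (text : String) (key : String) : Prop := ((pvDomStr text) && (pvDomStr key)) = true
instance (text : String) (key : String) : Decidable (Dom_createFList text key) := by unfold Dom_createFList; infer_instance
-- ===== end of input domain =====

-- B re-decomposes A (grouped column schedule + one zip sweep instead of Counter + str.index +
-- slices + nested round-robin while loop); same return value, no speed claim.

-- ===== PORT A =====
-- a Python character (a length-1 str) as a String
def pvChr (c : Char) : String := String.ofList [c]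

-- textlist[j].append(x)  (this exact line occurs in both Pythons)
def pvAppendAt (tl : List (List String)) (j : Int) (x : String) : List (List String) :=
  PySem.List.pySetD tl j (PySem.List.pyGetD tl j [] ++ [x])

-- A: 'for k in range(count): ind = key.index(i, istart); istart = ind + 1; indexes.append(ind)'
def pvIndexesLoop (key : List Char) (i : Char) (count : Int) : List Int × Int :=
  (PySem.List.pyRange 0 count 1).foldl
    (fun st _k =>
      let ind := PySem.Chars.findFrom key [i] st.2 none
      (st.1 ++ [ind], ind + 1)) ([], 0)

-- A: 'while s < end: for j in indexes: textlist[j].append(part[s-start]); s += 1'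
-- (fuel only makes the loop total; Python advances s inside the for)
def pvWhileA (part : List Char) (startv endv : Int) (indexes : List Int) :
    Nat → List (List String) × Int → List (List String) × Int
  | 0, st => st
  | fuel+1, st =>
    if st.2 < endv then
      pvWhileA part startv endv indexes fuel
        (indexes.foldl
          (fun p j => (pvAppendAt p.1 j (pvChr (PySem.List.pyGetD part (p.2 - startv) ' ')), p.2 + 1)) st)
    else st

-- A: the body of 'for i in sorted(set(key))' on the state (textlist, start)
def pvGroupStep (text key : String) (keycount : PySem.Dict Char Int) (no_of_rows : Int)
    (st : List (List String) × Int) (i : Char) : List (List String) × Int :=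
  let tl := st.1
  let start := st.2
  if keycount.getD i 0 == 1 then
    let ind := PySem.Chars.find key.toList [i]
    let end_ := start + no_of_rows
    (PySem.List.pySetD tl ind
      ((PySem.List.slice text.toList (some start) (some end_)).map pvChr), end_)
  else
    let count := keycount.getD i 0
    let indexes := (pvIndexesLoop key.toList i count).1
    let end_ := start + no_of_rows * count
    let part := PySem.List.slice text.toList (some start) (some end_)
    let st' := pvWhileA part start end_ indexes (end_ - start).toNat (tl, start)
    (st'.1, end_)

def createFList (text : String) (key : String) : List (List String) × Int :=
  let keycount := PySem.Dict.counter key.toList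
  let keylen : Int := PySem.Str.len key
  let textlen : Int := PySem.Str.len text
  let textlist : List (List String) := (PySem.List.pyRange 0 keylen 1).map (fun _ => [])
  let no_of_rows : Int := PySem.Int.truncdiv textlen keylen
  let res := (PySem.List.sorted (PySem.Set.ofList key.toList) (fun c => c) false).foldl
    (pvGroupStep text key keycount no_of_rows) (textlist, 0)
  (res.1, no_of_rows)

-- ===== PORT B =====
def createFList_alt (text : String) (key : String) : List (List String) × Int :=
  let keylen : Int := PySem.Str.len key
  let no_of_rows : Int := PySem.Int.truncdiv (PySem.Str.len text) keylen
  let cols := (PySem.List.enumerate key.toList 0).foldl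
    (fun d p => d.modify p.2 [] (fun l => l ++ [p.1])) PySem.Dict.empty
  let schedule := (PySem.List.sorted cols.keys (fun c => c) false).foldl
    (fun sch ch => sch ++ PySem.List.pyRepeat (cols.getD ch []) no_of_rows) []
  let textlist : List (List String) := (PySem.List.pyRange 0 keylen 1).map (fun _ => [])
  let filled := (schedule.zip text.toList).foldl
    (fun tl p => pvAppendAt tl p.1 (pvChr p.2)) textlist
  (filled, no_of_rows)

-- ===== PRECONDITION & SPEC =====
-- Pre_ excludes only the empty key, on which both A and B raise ZeroDivisionError.
def Pre_createFList (text : String) (key : String) : Prop := key.toList ≠ []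
instance (text : String) (key : String) : Decidable (Pre_createFList text key) := by
  unfold Pre_createFList; infer_instance

def pvWitness_createFList : String × String := ("hello world!", "zebra")

def Spec_createFList (text : String) (key : String) (out : List (List String) × Int) : Prop :=
  out = createFList_alt text key
instance (text : String) (key : String) (out : List (List String) × Int) :
    Decidable (Spec_createFList text key out) := by unfold Spec_createFList; infer_instance

-- ===== CLAIM (what is proved, stated in full; the proofs are below) =====
def Claim_equal_createFList : Prop := ∀ (text : String) (key : String),
  Dom_createFList text key → Pre_createFList text key →
  Spec_createFList text key (createFList text key)

-- ===== LEMMAS AND PROOFS =====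

def pvPos : List Char → Char → Nat → List Nat
  | [], _, _ => []
  | x :: xs, c, m => if x = c then m :: pvPos xs c (m+1) else pvPos xs c (m+1)

def pvIntList (P : List Nat) : List Int := P.map (fun p : Nat => (p : Int))

@[simp] lemma pvIntList_nil : pvIntList [] = [] := rfl

@[simp] lemma pvIntList_cons (p : Nat) (P : List Nat) :
    pvIntList (p :: P) = ((p : Int)) :: pvIntList P := rfl

@[simp] lemma pvIntList_length (P : List Nat) : (pvIntList P).length = P.length := by
  simp [pvIntList]

def pvFill (tl : List (List String)) (pairs : List (Int × Char)) : List (List String) :=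
  pairs.foldl (fun tl p => pvAppendAt tl p.1 (pvChr p.2)) tl

lemma pvPos_length (l : List Char) (c : Char) (m : Nat) :
    (pvPos l c m).length = l.count c := by
  induction l generalizing m with
  | nil => simp [pvPos]
  | cons x xs ih =>
    by_cases h : x = c <;> simp [pvPos, h, ih, List.count_cons, eq_comm]

lemma pvPos_spec (l : List Char) (c : Char) (m p : Nat) (hp : p ∈ pvPos l c m) :
    ∃ j : Nat, j < l.length ∧ p = m + j ∧ l[j]? = some c := by
  induction l generalizing m with
  | nil => simp [pvPos] at hp
  | cons x xs ih =>
    rw [pvPos] at hp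
    split_ifs at hp with hx
    · subst hx
      rcases List.mem_cons.mp hp with rfl | hp'
      · exact ⟨0, by simp, by omega, by simp⟩
      · obtain ⟨j, hj, rfl, hc⟩ := ih _ hp'
        exact ⟨j+1, by simp; omega, by omega, by simpa using hc⟩
    · obtain ⟨j, hj, rfl, hc⟩ := ih _ hp
      exact ⟨j+1, by simp; omega, by omega, by simpa using hc⟩

lemma pvPos_head (l : List Char) (c : Char) (m : Nat) (h : c ∈ l) :
    pvPos l c m = (m + l.idxOf c) :: pvPos (l.drop (l.idxOf c + 1)) c (m + l.idxOf c + 1) := by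
  induction l generalizing m with
  | nil => simp at h
  | cons x xs ih =>
    by_cases hx : x = c
    · subst hx; simp [pvPos, List.idxOf_cons_self]
    · have hc : c ∈ xs := by cases h with | head => exact absurd rfl hx | tail _ h => exact h
      rw [pvPos, if_neg hx, List.idxOf_cons_ne _ (by simpa using hx), ih (m+1) hc]
      congr 1 <;> [skip; congr 1] <;> omega

lemma pv_foldl_const {α β : Type} (l : List α) (g : β → β) (init : β) :
    l.foldl (fun st _ => g st) init = g^[l.length] init := by
  induction l generalizing init with
  | nil => rfl
  | cons x xs ih => simp [List.foldl_cons, ih, Function.iterate_succ_apply]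

lemma pv_zip_append {α β : Type} (s1 s2 : List α) (ch : List β) :
    (s1 ++ s2).zip ch = s1.zip (ch.take s1.length) ++ s2.zip (ch.drop s1.length) := by
  induction s1 generalizing ch with
  | nil => simp
  | cons x xs ih =>
    cases ch with
    | nil => simp
    | cons c cs => simp [List.zip_cons_cons, ih]

lemma pv_zip_replicate {α β : Type} (p : α) (seg : List β) :
    (List.replicate seg.length p).zip seg = seg.map (fun ch => (p, ch)) := by
  induction seg with
  | nil => simp
  | cons c cs ih => simpa [List.replicate_succ, List.zip_cons_cons] using ih

lemma pvFill_length (tl : List (List String)) (ps : List (Int × Char)) :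
    (pvFill tl ps).length = tl.length := by
  induction ps generalizing tl with
  | nil => rfl
  | cons q qs ih => simp [pvFill, List.foldl_cons] at ih ⊢; rw [ih]; simp [pvAppendAt]

lemma pvFill_getD_not_mem (tl : List (List String)) (ps : List (Int × Char)) (q : Nat)
    (h : ∀ pr ∈ ps, 0 ≤ pr.1 ∧ pr.1 ≠ (q : Int)) :
    (pvFill tl ps).getD q [] = tl.getD q [] := by
  induction ps generalizing tl with
  | nil => rfl
  | cons pr prs ih =>
    simp only [pvFill, List.foldl_cons] at ih ⊢
    rw [ih _ (fun x hx => h x (List.mem_cons_of_mem _ hx))]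
    obtain ⟨hnn, hne⟩ := h pr (List.mem_cons_self)
    simp only [pvAppendAt, PySem.List.pySetD_of_nonneg _ _ hnn]
    have hq : pr.1.toNat ≠ q := by omega
    simp only [List.getD]
    rw [List.getElem?_set_ne hq]

lemma pv_idxOf_le (l : List Char) (c : Char) (j : Nat) (hj : j < l.length) (hc : l[j] = c) :
    l.idxOf c ≤ j := by
  have hmem : c ∈ l.take (j+1) := by
    have h2 : (l.take (j+1))[j]'(by simp; omega) = c := by simpa [List.getElem_take] using hc
    exact h2 ▸ List.getElem_mem _
  have := (List.mem_take_iff_idxOf_lt (List.mem_of_mem_take hmem)).mp hmem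
  omega

lemma pv_singleton_prefix (c : Char) (l : List Char) : [c] <+: l ↔ l.head? = some c := by
  cases l with
  | nil => simp
  | cons x xs =>
    constructor
    · rintro ⟨t, ht⟩; simpa using (congrArg (·.head?) ht).symm
    · intro h; simp at h; exact ⟨xs, by simp [h]⟩

lemma pv_find_single (s : List Char) (c : Char) (h : c ∈ s) :
    PySem.Chars.find s [c] = (s.idxOf c : Int) := by
  have hinf : [c] <:+: s := (List.singleton_infix_iff c s).mpr h
  have hnn : 0 ≤ PySem.Chars.find s [c] := (PySem.Chars.find_nonneg_iff s [c]).mpr hinf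
  obtain ⟨hpre, hmin⟩ := PySem.Chars.find_spec hnn
  set j := (PySem.Chars.find s [c]).toNat with hj
  have hjc : s[j]? = some c := by
    rw [pv_singleton_prefix] at hpre
    rwa [List.head?_drop] at hpre
  have hjlt : j < s.length := (List.getElem?_eq_some_iff.mp hjc).1
  have hje : s[j] = c := by
    have := List.getElem?_eq_some_iff.mp hjc
    exact this.2
  have h1 : s.idxOf c ≤ j := pv_idxOf_le s c j hjlt hje
  have h2 : ¬ (s.idxOf c < j) := by
    intro hlt
    apply hmin _ hlt
    rw [pv_singleton_prefix, List.head?_drop]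
    rw [List.getElem?_eq_some_iff]
    exact ⟨List.idxOf_lt_length_of_mem h, List.getElem_idxOf (List.idxOf_lt_length_of_mem h)⟩
  have : s.idxOf c = j := by omega
  omega

lemma pv_findFrom_single (s : List Char) (c : Char) (m : Nat) (hm : m ≤ s.length)
    (h : c ∈ s.drop m) :
    PySem.Chars.findFrom s [c] (m : Int) none = ((m + (s.drop m).idxOf c : Nat) : Int) := by
  rw [PySem.Chars.findFrom_natCast s [c] m hm, pv_find_single _ _ h]
  have : ((s.drop m).idxOf c : Int) ≠ -1 := by omega
  simp only [if_neg this]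
  push_cast
  ring

lemma pv_indexes_aux (k : List Char) (c : Char) :
    ∀ (cnt m : Nat) (acc : List Int), m ≤ k.length → cnt = (k.drop m).count c →
    ((fun st : List Int × Int =>
        (st.1 ++ [PySem.Chars.findFrom k [c] st.2 none],
         PySem.Chars.findFrom k [c] st.2 none + 1))^[cnt] (acc, (m : Int))).1
      = acc ++ pvIntList (pvPos (k.drop m) c m) := by
  intro cnt
  induction cnt with
  | zero =>
    intro m acc hm hc
    have : pvPos (k.drop m) c m = [] := by
      have := pvPos_length (k.drop m) c m
      rw [← hc] at this
      exact List.eq_nil_of_length_eq_zero this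
    simp [this]
  | succ n ih =>
    intro m acc hm hc
    have hmem : c ∈ k.drop m := by
      rw [← List.count_pos_iff]; omega
    set idx := (k.drop m).idxOf c with hidx
    have hidxlt : idx < (k.drop m).length := List.idxOf_lt_length_of_mem hmem
    rw [Function.iterate_succ_apply]
    simp only [pv_findFrom_single k c m hm hmem]
    have hstep : ((m + idx + 1 : Nat) : Int) = ((m + idx : Nat) : Int) + 1 := by push_cast; ring
    rw [← hidx, ← hstep]
    have hdd : (k.drop m).drop (idx + 1) = k.drop (m + idx + 1) := by
      rw [List.drop_drop, Nat.add_assoc]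
    have hm' : m + idx + 1 ≤ k.length := by
      have : (k.drop m).length = k.length - m := List.length_drop
      omega
    have hcount' : n = (k.drop (m + idx + 1)).count c := by
      have h1 := pvPos_length (k.drop m) c m
      have h2 := pvPos_length (k.drop (m + idx + 1)) c (m + idx + 1)
      rw [pvPos_head _ _ _ hmem, ← hidx, hdd] at h1
      simp at h1
      omega
    rw [ih (m + idx + 1) _ hm' hcount']
    rw [pvPos_head _ _ _ hmem, ← hidx, hdd]
    simp

lemma pv_indexes_loop (k : List Char) (c : Char) (h : c ∈ k) :
    (pvIndexesLoop k c ((k.count c : Nat) : Int)).1 = pvIntList (pvPos k c 0) := by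
  unfold pvIndexesLoop
  rw [show ((k.count c : Nat) : Int) = ((k.count c : Nat) : Int) * 1 by ring]
  rw [show PySem.List.pyRange 0 (((k.count c : Nat) : Int) * 1) 1 = PySem.List.pyRange 0 ((k.count c : Nat) : Int) 1 by ring_nf]
  rw [PySem.List.pyRange_zero_nat]
  rw [List.foldl_map]
  rw [pv_foldl_const _ _ (([], (0:Int)) : List Int × Int)]
  rw [List.length_range]
  have := pv_indexes_aux k c (k.count c) 0 [] (by omega) (by simp)
  simpa using this

lemma pv_fill_col' (seg : List Char) (p : Nat) :
    ∀ (tl : List (List String)), p < tl.length →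
    pvFill tl (seg.map (fun ch => ((p : Int), ch))) = tl.set p (tl.getD p [] ++ seg.map pvChr) := by
  induction seg with
  | nil =>
    intro tl hp
    simp only [List.map_nil, pvFill, List.foldl_nil, List.append_nil]
    rw [List.getD_eq_getElem?_getD, List.getElem?_eq_getElem hp]
    simp
  | cons ch rest ih =>
    intro tl hp
    simp only [List.map_cons, pvFill, List.foldl_cons]
    have hstep : pvAppendAt tl ((p : Int)) (pvChr ch) = tl.set p (tl.getD p [] ++ [pvChr ch]) := by
      simp [pvAppendAt, PySem.List.pySetD_natCast, PySem.List.pyGetD_natCast]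
    rw [hstep]
    have := ih (tl.set p (tl.getD p [] ++ [pvChr ch])) (by simpa using hp)
    simp only [pvFill] at this
    rw [this]
    rw [List.set_set]
    congr 1
    rw [List.getD_eq_getElem?_getD, List.getElem?_set_self', List.getElem?_eq_getElem hp]
    simp

lemma pv_iter (part : List Char) (a : Nat) (P : List Nat) :
    ∀ (off : Nat) (tl : List (List String)), off + P.length ≤ part.length →
    ((pvIntList P).foldl
        (fun p j => (pvAppendAt p.1 j (pvChr (PySem.List.pyGetD part (p.2 - (a : Int)) ' ')), p.2 + 1))
        (tl, (a : Int) + (off : Int)))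
      = (pvFill tl ((pvIntList P).zip ((part.drop off).take P.length)),
         (a : Int) + ((off + P.length : Nat) : Int)) := by
  induction P with
  | nil =>
    intro off tl _
    simp [pvFill]
  | cons p rest ih =>
    intro off tl hlen
    have hoff : off < part.length := by simp at hlen; omega
    simp only [pvIntList_cons, List.foldl_cons]
    have hx : (a : Int) + (off : Int) - (a : Int) = ((off : Nat) : Int) := by ring
    rw [hx, PySem.List.pyGetD_natCast]
    have hdrop : part.drop off = part[off] :: part.drop (off + 1) := List.drop_eq_getElem_cons hoff
    have hgd : part.getD off ' ' = part[off] := List.getD_eq_getElem part ' ' hoff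
    rw [hgd]
    have hs : (a : Int) + (off : Int) + 1 = (a : Int) + ((off + 1 : Nat) : Int) := by push_cast; ring
    rw [hs]
    rw [ih (off + 1) (pvAppendAt tl ((p:Nat) : Int) (pvChr part[off])) (by simp at hlen ⊢; omega)]
    refine Prod.ext ?_ ?_
    · dsimp only
      rw [hdrop]
      simp only [List.length_cons, List.take_succ_cons, List.zip_cons_cons, pvFill, List.foldl_cons]
    · dsimp only
      simp only [List.length_cons]
      push_cast
      ring

lemma pvFill_append (tl : List (List String)) (p1 p2 : List (Int × Char)) :
    pvFill tl (p1 ++ p2) = pvFill (pvFill tl p1) p2 := by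
  simp [pvFill]

lemma pv_while (part : List Char) (a : Nat) (P : List Nat) (hP : P ≠ []) :
    ∀ (rows fuel : Nat) (off : Nat) (tl : List (List String)),
      part.length = off + P.length * rows → rows ≤ fuel →
      pvWhileA part (a : Int) ((a : Int) + (part.length : Int)) (pvIntList P) fuel
          (tl, (a : Int) + (off : Int))
        = (pvFill tl (((List.replicate rows (pvIntList P)).flatten).zip (part.drop off)),
           (a : Int) + (part.length : Int)) := by
  intro rows
  induction rows with
  | zero =>
    intro fuel off tl hlen hfuel
    have hoff : off = part.length := by omega
    subst hoff
    have hnil : part.drop part.length = [] := by simp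
    have hcond : ¬ ((a : Int) + (part.length : Int) < (a : Int) + (part.length : Int)) := by omega
    cases fuel with
    | zero => simp [pvWhileA, hnil, pvFill]
    | succ f => simp [pvWhileA, hcond, hnil, pvFill]
  | succ n ih =>
    intro fuel off tl hlen hfuel
    have hPlen : 0 < P.length := List.length_pos_of_ne_nil hP
    have hmul : P.length * (n + 1) = P.length * n + P.length := by ring
    have hofflt : off < part.length := by omega
    cases fuel with
    | zero => omega
    | succ f =>
      rw [pvWhileA]
      have hcond : (a : Int) + (off : Int) < (a : Int) + (part.length : Int) := by
        have : (off : Int) < (part.length : Int) := by exact_mod_cast hofflt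
        omega
      rw [if_pos hcond]
      rw [pv_iter part a P off tl (by omega)]
      rw [ih f (off + P.length) _ (by omega) (by omega)]
      congr 1
      rw [List.replicate_succ, List.flatten_cons, pv_zip_append, pvFill_append,
        pvIntList_length, List.drop_drop]

lemma pv_sum_ite (d : List Char) (x : Char) :
    (d.map (fun c => if x = c then 1 else 0)).sum = d.count x := by
  induction d with
  | nil => simp
  | cons y d' ihd =>
    simp only [List.map_cons, List.sum_cons, ihd, List.count_cons]
    by_cases h : x = y
    · simp [h, Nat.add_comm]
    · simp [h, Ne.symm h]

lemma pv_counts_sum (k : List Char) (d : List Char) (hnd : d.Nodup)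
    (hall : ∀ c ∈ k, c ∈ d) :
    (d.map (fun c => k.count c)).sum = k.length := by
  induction k with
  | nil => simp
  | cons x k' ih =>
    have hx : x ∈ d := hall x List.mem_cons_self
    have hall' : ∀ c ∈ k', c ∈ d := fun c hc => hall c (List.mem_cons_of_mem _ hc)
    have hsplit : (d.map (fun c => (x :: k').count c)).sum
        = (d.map (fun c => k'.count c)).sum + (d.map (fun c => if x = c then 1 else 0)).sum := by
      rw [← List.sum_map_add]
      simp [List.count_cons]
    rw [hsplit, ih hall']
    rw [pv_sum_ite, List.count_eq_one_of_mem hnd hx]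
    simp [Nat.add_comm]

lemma pv_enum_filter (c : Char) (xs : List Char) :
    ∀ (m : Nat), (List.map (fun x => x.2)
      (List.filter (fun p => p.1 == c) ((PySem.List.enumerate xs (m : Int)).map Prod.swap)))
      = pvIntList (pvPos xs c m) := by
  induction xs with
  | nil => intro m; simp [PySem.List.enumerate_nil, pvPos]
  | cons x xs ih =>
    intro m
    rw [PySem.List.enumerate_cons, List.map_cons, Prod.swap_prod_mk, List.filter_cons]
    have hcast : (m : Int) + 1 = ((m + 1 : Nat) : Int) := by push_cast; ring
    rw [hcast]
    by_cases h : x = c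
    · subst h
      rw [if_pos (by simp), List.map_cons, ih (m+1),
        show pvPos (x :: xs) x m = m :: pvPos xs x (m+1) from by simp [pvPos]]
      simp
    · rw [if_neg (by simp [h]), ih (m+1),
        show pvPos (x :: xs) c m = pvPos xs c (m+1) from by simp [pvPos, h]]

lemma pv_cols_getD (k : List Char) (c : Char) :
    (((PySem.List.enumerate k 0).foldl
        (fun d p => d.modify p.2 [] (fun l => l ++ [p.1])) PySem.Dict.empty).getD c [])
      = pvIntList (pvPos k c 0) := by
  have hswap : (List.foldl (fun (d : PySem.Dict Char (List Int)) (p : Int × Char) =>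
        d.modify p.2 [] (fun l => l ++ [p.1])) PySem.Dict.empty (PySem.List.enumerate k 0))
      = (((PySem.List.enumerate k 0).map Prod.swap).foldl
        (fun d p => d.modify p.1 [] (fun l => l ++ [p.2])) PySem.Dict.empty) := by
    rw [List.foldl_map]
    rfl
  rw [hswap, PySem.Dict.getD_foldl_modify_append, PySem.Dict.getD_empty, List.nil_append]
  have h0 : ((0 : Nat) : Int) = (0 : Int) := rfl
  rw [← h0, pv_enum_filter c k 0]

lemma pv_cols_keys (k : List Char) :
    (((PySem.List.enumerate k 0).foldl
        (fun d p => d.modify p.2 [] (fun l => l ++ [p.1])) PySem.Dict.empty).keys)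
      = PySem.Set.ofList k := by
  have h := PySem.Dict.keys_foldl_modify_key (PySem.List.enumerate k 0) Prod.snd
    ([] : List Int) (fun _ p => (fun l => l ++ [p.1])) PySem.Dict.empty
  rw [h, PySem.List.map_snd_enumerate]
  rw [show (PySem.Dict.empty : PySem.Dict Char (List Int)).keys = [] from rfl]
  exact PySem.Set.update_nil_left k

def pvBlk (k : List Char) (r : Nat) (c : Char) : List Int :=
  (List.replicate r (pvIntList (pvPos k c 0))).flatten

lemma pv_flatten_replicate_singleton (r : Nat) (x : Int) :
    (List.replicate r [x]).flatten = List.replicate r x := by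
  induction r with
  | zero => rfl
  | succ n ih => simp [List.replicate_succ, ih]

lemma pvPos_getElem (k : List Char) (c : Char) (p : Nat) (hp : p ∈ pvPos k c 0) :
    p < k.length ∧ k[p]? = some c := by
  obtain ⟨j, hj, hpe, hc⟩ := pvPos_spec k c 0 p hp
  constructor
  · omega
  · subst hpe; simpa using hc

lemma pv_truncdiv_cast (n K : Nat) :
    PySem.Int.truncdiv (n : Int) (K : Int) = ((n / K : Nat) : Int) := by
  simp [PySem.Int.truncdiv]

lemma pv_zip_replicate' {α β : Type} (L : Nat) (p : α) (seg : List β) (h : seg.length = L) :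
    (List.replicate L p).zip seg = seg.map (fun ch => (p, ch)) := by
  subst h; exact pv_zip_replicate p seg

lemma pvBlk_length (k : List Char) (r : Nat) (c : Char) :
    (pvBlk k r c).length = r * k.count c := by
  simp [pvBlk, List.length_flatten, List.map_replicate, List.sum_replicate, pvPos_length,
    smul_eq_mul]

lemma pvBlk_mem (k : List Char) (r : Nat) (c : Char) (x : Int) (hx : x ∈ pvBlk k r c) :
    ∃ q : Nat, x = (q : Int) ∧ q ∈ pvPos k c 0 := by
  simp only [pvBlk, List.mem_flatten] at hx
  obtain ⟨l, hl, hxl⟩ := hx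
  rw [List.eq_of_mem_replicate hl] at hxl
  simp only [pvIntList, List.mem_map] at hxl
  obtain ⟨q, hq, rfl⟩ := hxl
  exact ⟨q, rfl, hq⟩

-- one group of A's loop body equals one schedule block of B's fill

lemma pv_group_step (text key : String) (r : Nat) (c : Char) (hck : c ∈ key.toList)
    (tl : List (List String)) (a : Nat)
    (hlen : tl.length = key.toList.length)
    (hbound : a + r * key.toList.count c ≤ text.toList.length)
    (hemp : ∀ p ∈ pvPos key.toList c 0, tl.getD p [] = []) :
    pvGroupStep text key (PySem.Dict.counter key.toList) (r : Int) (tl, (a : Int)) c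
      = (pvFill tl ((pvBlk key.toList r c).zip ((text.toList.drop a).take (r * key.toList.count c))),
         ((a + r * key.toList.count c : Nat) : Int)) := by
  have hcntD : (PySem.Dict.counter key.toList).getD c 0 = ((key.toList.count c : Nat) : Int) :=
    PySem.Dict.getD_counter key.toList c
  have hcpos : 0 < key.toList.count c := List.count_pos_iff.mpr hck
  have hseglen : ((text.toList.drop a).take (r * key.toList.count c)).length
      = r * key.toList.count c := by
    rw [List.length_take, List.length_drop]
    omega
  by_cases h1 : key.toList.count c = 1
  · -- singleton branch
    have hcond : ((PySem.Dict.counter key.toList).getD c 0 == (1 : Int)) = true := by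
      rw [hcntD, h1]; simp
    unfold pvGroupStep
    rw [hcond]
    simp only [if_true]
    have hidx : PySem.Chars.find key.toList [c] = ((key.toList.idxOf c : Nat) : Int) :=
      pv_find_single key.toList c hck
    have hslice : PySem.List.slice text.toList (some ((a:Nat) : Int))
        (some (((a:Nat) : Int) + ((r:Nat) : Int))) = (text.toList.drop a).take r :=
      PySem.List.slice_natCast_add text.toList a r
    rw [hidx, hslice]
    have hPos : pvPos key.toList c 0 = [key.toList.idxOf c] := by
      have hh := pvPos_head key.toList c 0 hck
      simp only [Nat.zero_add] at hh
      have hl := pvPos_length key.toList c 0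
      rw [hh] at hl ⊢
      rw [List.length_cons, h1] at hl
      have h0 : (pvPos (key.toList.drop (key.toList.idxOf c + 1)) c (key.toList.idxOf c + 1)).length = 0 := by omega
      rw [List.eq_nil_of_length_eq_zero h0]
    have hblk : pvBlk key.toList r c = List.replicate r ((key.toList.idxOf c : Nat) : Int) := by
      rw [pvBlk, hPos]
      simpa using pv_flatten_replicate_singleton r _
    have hidxlt : key.toList.idxOf c < tl.length := hlen ▸ List.idxOf_lt_length_of_mem hck
    have hsl : ((text.toList.drop a).take (r * key.toList.count c)) = (text.toList.drop a).take r := by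
      rw [h1]; ring_nf
    rw [hblk, hsl]
    have har : a + r ≤ text.toList.length := by
      rw [h1] at hbound; omega
    have hlen2 : ((text.toList.drop a).take r).length = r := by
      rw [List.length_take, List.length_drop]; omega
    rw [pv_zip_replicate' r _ _ hlen2, pv_fill_col' _ _ _ hidxlt]
    rw [hemp _ (hPos ▸ List.mem_singleton_self _), List.nil_append]
    rw [PySem.List.pySetD_natCast]
    refine Prod.ext rfl ?_
    dsimp only
    rw [h1]
    push_cast
    ring
  · -- duplicate branch
    have hcond : ((PySem.Dict.counter key.toList).getD c 0 == (1 : Int)) = false := by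
      rw [hcntD]
      have : ((key.toList.count c : Nat) : Int) ≠ (1 : Int) := by exact_mod_cast h1
      simp [this]
    unfold pvGroupStep
    rw [hcond]
    simp only [Bool.false_eq_true, if_false, hcntD]
    rw [pv_indexes_loop key.toList c hck]
    have hend : ((a : Nat) : Int) + ((r : Nat) : Int) * ((key.toList.count c : Nat) : Int)
        = ((a : Nat) : Int) + (((r * key.toList.count c : Nat) : Nat) : Int) := by
      push_cast; ring
    rw [hend]
    have hslice : PySem.List.slice text.toList (some ((a:Nat) : Int))
        (some (((a:Nat) : Int) + ((r * key.toList.count c : Nat) : Int)))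
        = (text.toList.drop a).take (r * key.toList.count c) :=
      PySem.List.slice_natCast_add text.toList a (r * key.toList.count c)
    rw [hslice]
    have hfuel : ((((a:Nat) : Int) + ((r * key.toList.count c : Nat) : Int)) - ((a:Nat) : Int)).toNat
        = r * key.toList.count c := by
      rw [add_sub_cancel_left, Int.toNat_natCast]
    rw [hfuel]
    have hPne : pvPos key.toList c 0 ≠ [] := by
      intro hnil
      have := pvPos_length key.toList c 0
      rw [hnil] at this
      simp at this
      omega
    have ha0 : ((a : Nat) : Int) = ((a : Nat) : Int) + ((0 : Nat) : Int) := by simp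
    conv_lhs => rw [show ((tl, ((a:Nat) : Int)) : List (List String) × Int)
      = (tl, ((a:Nat) : Int) + ((0:Nat) : Int)) from by rw [← ha0]]
    have hw := pv_while ((text.toList.drop a).take (r * key.toList.count c)) a
      (pvPos key.toList c 0) hPne r (r * key.toList.count c) 0 tl
      (by rw [hseglen, pvPos_length]; ring)
      (Nat.le_mul_of_pos_right r hcpos)
    rw [hseglen] at hw
    rw [hw]
    refine Prod.ext ?_ ?_
    · dsimp only
      rw [List.drop_zero]
      rfl
    · dsimp only
      push_cast
      ring

lemma pv_main (text key : String) (r : Nat) :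
    ∀ (gs : List Char) (tl : List (List String)) (a : Nat),
      gs.Nodup → (∀ c ∈ gs, c ∈ key.toList) →
      tl.length = key.toList.length →
      a + r * (gs.map (fun c => key.toList.count c)).sum ≤ text.toList.length →
      (∀ c ∈ gs, ∀ p ∈ pvPos key.toList c 0, tl.getD p [] = []) →
      gs.foldl (pvGroupStep text key (PySem.Dict.counter key.toList) (r : Int)) (tl, (a : Int))
        = (pvFill tl ((gs.flatMap (pvBlk key.toList r)).zip (text.toList.drop a)),
           ((a + r * (gs.map (fun c => key.toList.count c)).sum : Nat) : Int)) := by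
  intro gs
  induction gs with
  | nil => intro tl a _ _ _ _ _; simp [pvFill]
  | cons c gs' ih =>
    intro tl a hnd hmem hlen hbound hemp
    have hck : c ∈ key.toList := hmem c List.mem_cons_self
    have hcpos : 0 < key.toList.count c := List.count_pos_iff.mpr hck
    have hmul : r * (key.toList.count c + (gs'.map (fun c => key.toList.count c)).sum)
        = r * key.toList.count c + r * (gs'.map (fun c => key.toList.count c)).sum := by ring
    have hsum : ((c :: gs').map (fun c => key.toList.count c)).sum
        = key.toList.count c + (gs'.map (fun c => key.toList.count c)).sum := by simp
    rw [hsum] at hbound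
    have hbound1 : a + r * key.toList.count c ≤ text.toList.length := by omega
    rw [List.foldl_cons]
    rw [pv_group_step text key r c hck tl a hlen hbound1
      (hemp c List.mem_cons_self)]
    set tl' := pvFill tl ((pvBlk key.toList r c).zip
      ((text.toList.drop a).take (r * key.toList.count c))) with htl'
    have hnd' : gs'.Nodup := (List.nodup_cons.mp hnd).2
    have hcnot : c ∉ gs' := (List.nodup_cons.mp hnd).1
    have hmem' : ∀ c' ∈ gs', c' ∈ key.toList := fun c' hc' => hmem c' (List.mem_cons_of_mem _ hc')
    have hlen' : tl'.length = key.toList.length := by rw [htl', pvFill_length]; exact hlen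
    have hbound' : (a + r * key.toList.count c)
        + r * (gs'.map (fun c => key.toList.count c)).sum ≤ text.toList.length := by omega
    have hemp' : ∀ c' ∈ gs', ∀ p ∈ pvPos key.toList c' 0, tl'.getD p [] = [] := by
      intro c' hc' p hp
      have hne : c' ≠ c := fun h => hcnot (h ▸ hc')
      rw [htl', pvFill_getD_not_mem]
      · exact hemp c' (List.mem_cons_of_mem _ hc') p hp
      · intro pr hpr
        have hprb : pr.1 ∈ pvBlk key.toList r c := (List.of_mem_zip (by simpa using hpr)).1
        obtain ⟨q, hqe1, hq⟩ := pvBlk_mem key.toList r c pr.1 hprb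
        have hqc := pvPos_getElem key.toList c q hq
        have hpc := pvPos_getElem key.toList c' p hp
        constructor
        · rw [hqe1]; exact Int.natCast_nonneg q
        · intro hqe
          rw [hqe1] at hqe
          have hqp : q = p := by exact_mod_cast hqe
          subst hqp
          rw [hqc.2] at hpc
          exact hne (by simpa using hpc.2.symm)
    rw [ih tl' (a + r * key.toList.count c) hnd' hmem' hlen' hbound' hemp']
    refine Prod.ext ?_ ?_
    · dsimp only
      rw [List.flatMap_cons, pv_zip_append, pvFill_append, pvBlk_length, List.drop_drop, htl']
    · dsimp only
      rw [hsum]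
      push_cast
      ring

lemma pv_getD_const {α : Type} (l : List α) (p : Nat) :
    ((l.map (fun _ => ([] : List String))).getD p []) = [] := by
  rw [List.getD_eq_getElem?_getD, List.getElem?_map]
  cases l[p]? <;> simp

theorem pv_final (text key : String) (hpre : key.toList ≠ []) :
    createFList text key = createFList_alt text key := by
  have hK : 0 < key.toList.length := List.length_pos_of_ne_nil hpre
  have hlenk : PySem.Str.len key = ((key.toList.length : Nat) : Int) := by
    simp [PySem.Str.len_eq]
  have hlent : PySem.Str.len text = ((text.toList.length : Nat) : Int) := by
    simp [PySem.Str.len_eq]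
  set r : Nat := text.toList.length / key.toList.length with hr
  have htr : PySem.Int.truncdiv ((text.toList.length : Nat) : Int) ((key.toList.length : Nat) : Int)
      = ((r : Nat) : Int) := pv_truncdiv_cast _ _
  set GS := PySem.List.sorted (PySem.Set.ofList key.toList) (fun c => c) false with hGS
  have hGnd : GS.Nodup :=
    ((PySem.List.sorted_perm (PySem.Set.ofList key.toList) (fun c => c) false).nodup_iff).mpr
      (PySem.Set.nodup_ofList key.toList)
  have hGmem : ∀ c ∈ GS, c ∈ key.toList := by
    intro c hc
    rw [hGS, PySem.List.mem_sorted] at hc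
    exact (PySem.Set.mem_ofList key.toList c).mp hc
  have hGall : ∀ c ∈ key.toList, c ∈ GS := by
    intro c hc
    rw [hGS, PySem.List.mem_sorted]
    exact (PySem.Set.mem_ofList key.toList c).mpr hc
  have hsum : (GS.map (fun c => key.toList.count c)).sum = key.toList.length :=
    pv_counts_sum key.toList GS hGnd hGall
  set tl0 : List (List String) :=
    (PySem.List.pyRange 0 ((key.toList.length : Nat) : Int) 1).map (fun _ => []) with htl0
  have hlen0 : tl0.length = key.toList.length := by
    rw [htl0, PySem.List.pyRange_zero_nat]
    simp
  have hemp0 : ∀ c ∈ GS, ∀ p ∈ pvPos key.toList c 0, tl0.getD p [] = [] := by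
    intro c _ p _
    rw [htl0, PySem.List.pyRange_zero_nat, List.map_map]
    simp only [Function.comp_def]
    exact pv_getD_const _ p
  have hbound0 : 0 + r * (GS.map (fun c => key.toList.count c)).sum ≤ text.toList.length := by
    rw [hsum, Nat.zero_add, hr]
    exact Nat.div_mul_le_self _ _
  have hmain := pv_main text key r GS tl0 0 hGnd hGmem hlen0 hbound0 hemp0
  -- B's dict and schedule
  have hcols_keys := pv_cols_keys key.toList
  have hg : (fun ch => PySem.List.pyRepeat
      (((PySem.List.enumerate key.toList 0).foldl
        (fun d p => d.modify p.2 [] (fun l => l ++ [p.1])) PySem.Dict.empty).getD ch [])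
      ((r : Nat) : Int)) = pvBlk key.toList r := by
    funext ch
    rw [pv_cols_getD]
    simp [PySem.List.pyRepeat, pvBlk]
  -- assemble
  show createFList text key = createFList_alt text key
  unfold createFList createFList_alt
  simp only [hlent, hlenk, htr, hcols_keys]
  rw [PySem.List.foldl_append_eq_flatMap, List.nil_append, hg]
  simp only [Nat.cast_zero, List.drop_zero] at hmain
  rw [hmain]
  rfl

-- ===== VERDICT (by name: the statement is the Claim_ definition above) =====
theorem createFList_spec : Claim_equal_createFList := by
  intro text key _hdom hpre
  unfold Spec_createFList
  exact pv_final text key hpre
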